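-- pv_equiv track=rewrite | github.com/CianLR/judge-solutions | advent_of_code/2023/day16/second.py | dfs
-- ===== SOURCE A (Python) =====
-- UP    = (-1,  0)
--
-- DOWN  = ( 1,  0)
--
-- LEFT  = ( 0, -1)
--
-- RIGHT = ( 0,  1)
--
-- FWSLASH = {
--   UP: RIGHT,
--   DOWN: LEFT,
--   LEFT: DOWN,
--   RIGHT: UP,
-- }
--
-- BKSLASH = {
--   UP: LEFT,
--   DOWN: RIGHT,
--   LEFT: UP,
--   RIGHT: DOWN,
-- }
--
-- def within_grid(grid, r, c):
--   return 0 <= r < len(grid) and 0 <= c < len(grid[r])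
--
-- def vec_add(v1, v2):
--   return (v1[0] + v2[0], v1[1] + v2[1])
--
-- def dfs(grid, pos, direc, seen):
--   if (pos, direc) in seen:
--     return seen
--   if not within_grid(grid, *pos):
--     return seen
--   seen.add((pos, direc))
--   r, c = pos
--   if grid[r][c] == '.':
--     dfs(grid, vec_add(pos, direc), direc, seen)
--   elif grid[r][c] == '/':
--     nd = FWSLASH[direc]
--     dfs(grid, vec_add(pos, nd), nd, seen)
--   elif grid[r][c] == '\\':
--     nd = BKSLASH[direc]
--     dfs(grid, vec_add(pos, nd), nd, seen)
--   elif grid[r][c] == '-':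
--     if direc in (LEFT, RIGHT):
--       dfs(grid, vec_add(pos, direc), direc, seen)
--     else:
--       dfs(grid, vec_add(pos, RIGHT), RIGHT, seen)
--       dfs(grid, vec_add(pos, LEFT), LEFT, seen)
--   elif grid[r][c] == '|':
--     if direc in (UP, DOWN):
--       dfs(grid, vec_add(pos, direc), direc, seen)
--     else:
--       dfs(grid, vec_add(pos, UP), UP, seen)
--       dfs(grid, vec_add(pos, DOWN), DOWN, seen)
--   return seen
-- ===== SOURCE B (Python) =====
-- # B: iterative re-implementation of dfs with an explicit stack (no recursion);
-- # same guards applied at pop time, same visit order, same in-place mutation of `seen`.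
--
-- UP    = (-1,  0)
-- DOWN  = ( 1,  0)
-- LEFT  = ( 0, -1)
-- RIGHT = ( 0,  1)
--
-- FWSLASH = {
--   UP: RIGHT,
--   DOWN: LEFT,
--   LEFT: DOWN,
--   RIGHT: UP,
-- }
--
-- BKSLASH = {
--   UP: LEFT,
--   DOWN: RIGHT,
--   LEFT: UP,
--   RIGHT: DOWN,
-- }
--
-- def within_grid(grid, r, c):
--   return 0 <= r < len(grid) and 0 <= c < len(grid[r])
--
-- def vec_add(v1, v2):
--   return (v1[0] + v2[0], v1[1] + v2[1])
--
-- def _successors(grid, p, d):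
--   r, c = p
--   ch = grid[r][c]
--   if ch == '.':
--     return [(vec_add(p, d), d)]
--   if ch == '/':
--     nd = FWSLASH[d]
--     return [(vec_add(p, nd), nd)]
--   if ch == '\\':
--     nd = BKSLASH[d]
--     return [(vec_add(p, nd), nd)]
--   if ch == '-':
--     if d in (LEFT, RIGHT):
--       return [(vec_add(p, d), d)]
--     return [(vec_add(p, RIGHT), RIGHT), (vec_add(p, LEFT), LEFT)]
--   if ch == '|':
--     if d in (UP, DOWN):
--       return [(vec_add(p, d), d)]
--     return [(vec_add(p, UP), UP), (vec_add(p, DOWN), DOWN)]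
--   return []
--
-- def dfs(grid, pos, direc, seen):
--   stack = [(pos, direc)]
--   while stack:
--     state = stack.pop()
--     if state in seen or not within_grid(grid, *state[0]):
--       continue
--     seen.add(state)
--     stack.extend(reversed(_successors(grid, state[0], state[1])))
--   return seen
-- ===== Notes on version B (the rewrite author's own statement) =====
-- stated objective: idiomatic
-- what changed: The recursive beam DFS is rewritten as an iterative worklist loop: an explicit stack seeded with the start state, pop-time guards, and successor states pushed in reverse so the visit order (and the returned seen set) is identical; no Python recursion (and no recursion-depth limit) is involved.
import Mathlib
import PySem

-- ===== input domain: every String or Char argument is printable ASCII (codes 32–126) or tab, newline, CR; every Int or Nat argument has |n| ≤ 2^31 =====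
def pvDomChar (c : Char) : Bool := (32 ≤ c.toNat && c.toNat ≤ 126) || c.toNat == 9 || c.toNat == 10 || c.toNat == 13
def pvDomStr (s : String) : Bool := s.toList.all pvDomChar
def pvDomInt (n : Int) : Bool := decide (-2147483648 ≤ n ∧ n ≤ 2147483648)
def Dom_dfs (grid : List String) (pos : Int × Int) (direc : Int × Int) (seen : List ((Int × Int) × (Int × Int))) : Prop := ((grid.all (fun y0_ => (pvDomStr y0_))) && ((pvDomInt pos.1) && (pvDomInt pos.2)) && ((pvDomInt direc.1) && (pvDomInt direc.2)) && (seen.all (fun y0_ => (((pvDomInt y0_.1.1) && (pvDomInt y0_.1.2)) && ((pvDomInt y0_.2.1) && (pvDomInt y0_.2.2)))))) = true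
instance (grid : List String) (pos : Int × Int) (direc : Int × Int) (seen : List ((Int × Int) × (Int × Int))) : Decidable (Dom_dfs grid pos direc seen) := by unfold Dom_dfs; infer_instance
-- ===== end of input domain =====

-- B replaces A's recursion by an explicit-stack loop with the same pop-time guards and visit
-- order (objective: idiomatic; both mutate `seen` in place in Python — the claim is about the
-- returned set, whose insertion-order list the two ports build identically).

-- ===== PORT A =====
-- shared module context of Source A / Source B: direction constants, the two mirror dicts,
-- within_grid and vec_add
def pvUP : Int × Int := (-1, 0)
def pvDOWN : Int × Int := (1, 0)
def pvLEFT : Int × Int := (0, -1)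
def pvRIGHT : Int × Int := (0, 1)

def pvFWSLASH : PySem.Dict (Int × Int) (Int × Int) :=
  PySem.Dict.ofList [(pvUP, pvRIGHT), (pvDOWN, pvLEFT), (pvLEFT, pvDOWN), (pvRIGHT, pvUP)]

def pvBKSLASH : PySem.Dict (Int × Int) (Int × Int) :=
  PySem.Dict.ofList [(pvUP, pvLEFT), (pvDOWN, pvRIGHT), (pvLEFT, pvUP), (pvRIGHT, pvDOWN)]

-- within_grid(grid, r, c): 0 <= r < len(grid) and 0 <= c < len(grid[r]) (short-circuit: grid[r] safe)
def pvWithin (grid : List String) (r c : Int) : Bool :=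
  decide (0 ≤ r ∧ r < (grid.length : Int)) &&
    (match PySem.List.pyGet? grid r with
     | some row => decide (0 ≤ c ∧ c < PySem.Str.len row)
     | none => false)

def pvVadd (a b : Int × Int) : Int × Int := (a.1 + b.1, a.2 + b.2)

-- fuel: an upper bound on the number of `seen.add`s any run can perform (at most 5
-- directions ever occur × number of grid cells, +1); pure totality scaffolding for Lean,
-- both ports use it identically and the equivalence is proved for EVERY fuel value.
def pvFuel (grid : List String) : Nat := 5 * ((grid.map PySem.Str.len).sum).toNat + 1

-- A's recursion, fuel-threaded left to right; `none` = Python raised (KeyError on a mirror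
-- with a non-cardinal direction — excluded by Pre_) or fuel ran out (never, with pvFuel).
def dfsF (grid : List String) :
    Nat → (Int × Int) × (Int × Int) → List ((Int × Int) × (Int × Int)) →
    Option (Nat × List ((Int × Int) × (Int × Int)))
  | n, st, seen =>
    if PySem.Set.contains seen st then some (n, seen)
    else if !pvWithin grid st.1.1 st.1.2 then some (n, seen)
    else
      match n with
      | 0 => none
      | Nat.succ m =>
        match PySem.List.pyGet? grid st.1.1 with
        | none => none
        | some row =>
          match PySem.Str.pyGet? row st.1.2 with
          | none => none
          | some ch =>
            if ch = '.' then dfsF grid m (pvVadd st.1 st.2, st.2) (PySem.Set.add seen st)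
            else if ch = '/' then
              match PySem.Dict.get? pvFWSLASH st.2 with
              | none => none
              | some nd => dfsF grid m (pvVadd st.1 nd, nd) (PySem.Set.add seen st)
            else if ch = '\\' then
              match PySem.Dict.get? pvBKSLASH st.2 with
              | none => none
              | some nd => dfsF grid m (pvVadd st.1 nd, nd) (PySem.Set.add seen st)
            else if ch = '-' then
              if st.2 = pvLEFT ∨ st.2 = pvRIGHT then
                dfsF grid m (pvVadd st.1 st.2, st.2) (PySem.Set.add seen st)
              else
                match dfsF grid m (pvVadd st.1 pvRIGHT, pvRIGHT) (PySem.Set.add seen st) with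
                | none => none
                | some (n1, s1) => dfsF grid (min n1 m) (pvVadd st.1 pvLEFT, pvLEFT) s1
            else if ch = '|' then
              if st.2 = pvUP ∨ st.2 = pvDOWN then
                dfsF grid m (pvVadd st.1 st.2, st.2) (PySem.Set.add seen st)
              else
                match dfsF grid m (pvVadd st.1 pvUP, pvUP) (PySem.Set.add seen st) with
                | none => none
                | some (n1, s1) => dfsF grid (min n1 m) (pvVadd st.1 pvDOWN, pvDOWN) s1
            else some (m, PySem.Set.add seen st)
  termination_by n _ _ => n
  decreasing_by all_goals omega

def dfs (grid : List String) (pos : Int × Int) (direc : Int × Int) (seen : List ((Int × Int) × (Int × Int))) : List ((Int × Int) × (Int × Int)) :=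
  match dfsF grid (pvFuel grid) (pos, direc) seen with
  | some (_, s) => s
  | none => seen     -- unreachable under Pre_ and sufficient fuel

-- ===== PORT B =====
-- _successors(grid, p, d): the list of states pushed for the cell at p, in processing order
def pvSuccessors (grid : List String) (p d : Int × Int) :
    Option (List ((Int × Int) × (Int × Int))) :=
  match PySem.List.pyGet? grid p.1 with
  | none => none
  | some row =>
    match PySem.Str.pyGet? row p.2 with
    | none => none
    | some ch =>
      if ch = '.' then some [(pvVadd p d, d)]
      else if ch = '/' then
        match PySem.Dict.get? pvFWSLASH d with
        | none => none
        | some nd => some [(pvVadd p nd, nd)]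
      else if ch = '\\' then
        match PySem.Dict.get? pvBKSLASH d with
        | none => none
        | some nd => some [(pvVadd p nd, nd)]
      else if ch = '-' then
        if d = pvLEFT ∨ d = pvRIGHT then some [(pvVadd p d, d)]
        else some [(pvVadd p pvRIGHT, pvRIGHT), (pvVadd p pvLEFT, pvLEFT)]
      else if ch = '|' then
        if d = pvUP ∨ d = pvDOWN then some [(pvVadd p d, d)]
        else some [(pvVadd p pvUP, pvUP), (pvVadd p pvDOWN, pvDOWN)]
      else some []

-- the while-loop over the explicit stack; the list head is the stack top (Source B pops from the
-- array end and extends with reversed(successors), i.e. succs ++ rest here); same fuel scheme.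
def loopF (grid : List String) :
    Nat → List ((Int × Int) × (Int × Int)) → List ((Int × Int) × (Int × Int)) →
    Option (List ((Int × Int) × (Int × Int)))
  | _, [], seen => some seen
  | n, st :: rest, seen =>
    if PySem.Set.contains seen st || !pvWithin grid st.1.1 st.1.2 then
      loopF grid n rest seen
    else
      match n with
      | 0 => none
      | Nat.succ m =>
        match pvSuccessors grid st.1 st.2 with
        | none => none
        | some succs => loopF grid m (succs ++ rest) (PySem.Set.add seen st)
  termination_by n stack _ => (n, stack.length)
  decreasing_by all_goals simp_wf <;> omega

def dfs_alt (grid : List String) (pos : Int × Int) (direc : Int × Int) (seen : List ((Int × Int) × (Int × Int))) : List ((Int × Int) × (Int × Int)) :=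
  match loopF grid (pvFuel grid) [(pos, direc)] seen with
  | some s => s
  | none => seen     -- unreachable under Pre_ and sufficient fuel

-- ===== PRECONDITION & SPEC =====
-- the grid character at p, as A reads it after within_grid has passed
def pvCellAt (grid : List String) (p : Int × Int) : Option Char :=
  (PySem.List.pyGet? grid p.1).bind (fun row => PySem.Str.pyGet? row p.2)

-- the i-th point of the straight ray from pos in direction d
def pvRay (pos d : Int × Int) (i : Nat) : Int × Int := (pos.1 + i * d.1, pos.2 + i * d.2)

-- search bound for the ray (any in-grid ray of '.' cells is shorter than this)
def pvRayBound (grid : List String) : Nat :=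
  grid.length + ((grid.map PySem.Str.len).sum).toNat + 1

-- ray point i is an in-grid, not-yet-seen '.' cell (the beam passes it unchanged)
def pvRayDot (grid : List String) (pos direc : Int × Int) (seen : List ((Int × Int) × (Int × Int))) (i : Nat) : Bool :=
  pvWithin grid (pvRay pos direc i).1 (pvRay pos direc i).2 &&
  !(seen.contains (pvRay pos direc i, direc)) &&
  (pvCellAt grid (pvRay pos direc i) == some '.')

-- ray point k is an in-grid, not-yet-seen mirror cell (the KeyError site)
def pvRayMirror (grid : List String) (pos direc : Int × Int) (seen : List ((Int × Int) × (Int × Int))) (k : Nat) : Bool :=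
  pvWithin grid (pvRay pos direc k).1 (pvRay pos direc k).2 &&
  !(seen.contains (pvRay pos direc k, direc)) &&
  (pvCellAt grid (pvRay pos direc k) == some '/' ||
   pvCellAt grid (pvRay pos direc k) == some '\\')

-- the straight ray from pos crosses only '.' cells and then hits a mirror
def pvRayHitsMirror (grid : List String) (pos direc : Int × Int) (seen : List ((Int × Int) × (Int × Int))) : Bool :=
  (List.range (pvRayBound grid)).any (fun k =>
    (List.range k).all (pvRayDot grid pos direc seen) && pvRayMirror grid pos direc seen k)

-- Pre_ excludes EXACTLY the inputs on which Python A raises (KeyError from FWSLASH/BKSLASH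
-- looked up with a non-cardinal direction): a non-cardinal beam keeps its direction while it
-- crosses in-grid, not-yet-seen '.' cells, so A raises iff that straight ray reaches an
-- in-grid, not-yet-seen mirror cell. On every input where A returns, Pre_ holds.
def Pre_dfs (grid : List String) (pos : Int × Int) (direc : Int × Int) (seen : List ((Int × Int) × (Int × Int))) : Prop :=
  direc = (-1, 0) ∨ direc = (1, 0) ∨ direc = (0, -1) ∨ direc = (0, 1) ∨
  pvRayHitsMirror grid pos direc seen = false
instance (grid : List String) (pos : Int × Int) (direc : Int × Int) (seen : List ((Int × Int) × (Int × Int))) : Decidable (Pre_dfs grid pos direc seen) := by unfold Pre_dfs; infer_instance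

def pvWitness_dfs : List String × (Int × Int) × (Int × Int) × (List ((Int × Int) × (Int × Int))) :=
  (["./", "-|"], (0, 0), (0, 1), [])

def Spec_dfs (grid : List String) (pos : Int × Int) (direc : Int × Int) (seen : List ((Int × Int) × (Int × Int))) (out : List ((Int × Int) × (Int × Int))) : Prop := out = dfs_alt grid pos direc seen
instance (grid : List String) (pos : Int × Int) (direc : Int × Int) (seen : List ((Int × Int) × (Int × Int))) (out : List ((Int × Int) × (Int × Int))) : Decidable (Spec_dfs grid pos direc seen out) := by unfold Spec_dfs; infer_instance

-- ===== CLAIM (what is proved, stated in full; the proofs are below) =====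
def Claim_equal_dfs : Prop := ∀ (grid : List String) (pos : Int × Int) (direc : Int × Int) (seen : List ((Int × Int) × (Int × Int))), Dom_dfs grid pos direc seen → Pre_dfs grid pos direc seen → Spec_dfs grid pos direc seen (dfs grid pos direc seen)

-- ===== LEMMAS AND PROOFS =====

set_option maxHeartbeats 1000000

-- unfolding lemmas for the two guard exits, out-of-fuel, and one recursion step of dfsF
theorem dfsF_stop_seen (grid : List String) (n : Nat) (st : (Int × Int) × (Int × Int))
    (seen : List ((Int × Int) × (Int × Int))) (h : st ∈ seen) :
    dfsF grid n st seen = some (n, seen) := by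
  rw [dfsF.eq_def]; simp [h]

theorem dfsF_stop_out (grid : List String) (n : Nat) (st : (Int × Int) × (Int × Int))
    (seen : List ((Int × Int) × (Int × Int))) (h : pvWithin grid st.1.1 st.1.2 = false) :
    dfsF grid n st seen = some (n, seen) := by
  rw [dfsF.eq_def]; simp [h]

theorem dfsF_zero (grid : List String) (st : (Int × Int) × (Int × Int))
    (seen : List ((Int × Int) × (Int × Int))) (h1 : st ∉ seen)
    (h2 : pvWithin grid st.1.1 st.1.2 = true) :
    dfsF grid 0 st seen = none := by
  rw [dfsF.eq_def]; simp [h1, h2]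

-- one unfolding of dfsF past failed guards, phrased through pvSuccessors
theorem dfsF_succ_eq (grid : List String) (m : Nat) (st : (Int × Int) × (Int × Int))
    (seen : List ((Int × Int) × (Int × Int))) (h1 : st ∉ seen)
    (h2 : pvWithin grid st.1.1 st.1.2 = true) :
    dfsF grid (m + 1) st seen =
      match pvSuccessors grid st.1 st.2 with
      | none => none
      | some [] => some (m, PySem.Set.add seen st)
      | some [c] => dfsF grid m c (PySem.Set.add seen st)
      | some (c1 :: c2 :: _) =>
        match dfsF grid m c1 (PySem.Set.add seen st) with
        | none => none
        | some (n1, s1) => dfsF grid (min n1 m) c2 s1 := by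
  have hc : PySem.Set.contains seen st = false := by simpa using h1
  rw [dfsF.eq_def]
  unfold pvSuccessors
  simp only [hc, h2, Bool.not_true, Bool.false_eq_true, if_false]
  cases hrow : PySem.List.pyGet? grid st.1.1 with
  | none => simp only [hrow]
  | some row =>
    simp only [hrow]
    cases hch : PySem.Str.pyGet? row st.1.2 with
    | none => simp only [hch]
    | some ch =>
      simp only [hch]
      by_cases hd : ch = '.'
      · simp [hd]
      by_cases hs : ch = '/'
      · cases hx : PySem.Dict.get? pvFWSLASH st.2 <;> simp [hd, hs, hx]
      by_cases hb : ch = '\\'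
      · cases hx : PySem.Dict.get? pvBKSLASH st.2 <;> simp [hd, hs, hb, hx]
      by_cases hm : ch = '-'
      · by_cases hlr : st.2 = pvLEFT ∨ st.2 = pvRIGHT
        · simp [hd, hs, hb, hm, hlr]
        · simp [hd, hs, hb, hm, hlr]
      by_cases hp : ch = '|'
      · by_cases hud : st.2 = pvUP ∨ st.2 = pvDOWN
        · simp [hd, hs, hb, hm, hp, hud]
        · simp [hd, hs, hb, hm, hp, hud]
      simp [hd, hs, hb, hm, hp]

-- pvSuccessors returns at most two states
theorem pvSuccessors_len (grid : List String) (p d : Int × Int)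
    (l : List ((Int × Int) × (Int × Int))) (h : pvSuccessors grid p d = some l) :
    l.length ≤ 2 := by
  unfold pvSuccessors at h
  cases hrow : PySem.List.pyGet? grid p.1 with
  | none => simp only [hrow] at h; exact absurd h (by simp)
  | some row =>
    simp only [hrow] at h
    cases hch : PySem.Str.pyGet? row p.2 with
    | none => simp only [hch] at h; exact absurd h (by simp)
    | some ch =>
      simp only [hch] at h
      split_ifs at h <;>
        first
          | (cases hx : PySem.Dict.get? pvFWSLASH d <;> simp only [hx] at h <;> cases h <;> simp)
          | (cases hx : PySem.Dict.get? pvBKSLASH d <;> simp only [hx] at h <;> cases h <;> simp)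
          | (cases h <;> simp)

-- remaining fuel never grows
theorem dfsF_fuel_le (grid : List String) :
    ∀ n st seen n' s', dfsF grid n st seen = some (n', s') → n' ≤ n := by
  intro n
  induction n using Nat.strong_induction_on with
  | _ n ih =>
    intro st seen n' s' h
    by_cases h1 : st ∈ seen
    · rw [dfsF_stop_seen grid n st seen h1] at h
      simp only [Option.some.injEq, Prod.mk.injEq] at h
      omega
    by_cases h2 : pvWithin grid st.1.1 st.1.2
    · match n with
      | 0 => rw [dfsF_zero grid st seen h1 h2] at h; cases h
      | Nat.succ m =>
        rw [dfsF_succ_eq grid m st seen h1 h2] at h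
        cases hsucc : pvSuccessors grid st.1 st.2 with
        | none => rw [hsucc] at h; cases h
        | some l =>
          rw [hsucc] at h
          match l with
          | [] =>
            have h' : some (m, PySem.Set.add seen st) =
                (some (n', s') : Option (Nat × List ((Int × Int) × (Int × Int)))) := h
            simp only [Option.some.injEq, Prod.mk.injEq] at h'
            omega
          | [c] =>
            have h' : dfsF grid m c (PySem.Set.add seen st) = some (n', s') := h
            have := ih m (by omega) c (PySem.Set.add seen st) n' s' h'
            omega
          | c1 :: c2 :: tl =>
            have h' : (match dfsF grid m c1 (PySem.Set.add seen st) with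
                | none => none
                | some (n1, s1) => dfsF grid (min n1 m) c2 s1) = some (n', s') := h
            cases h3 : dfsF grid m c1 (PySem.Set.add seen st) with
            | none => rw [h3] at h'; cases h'
            | some v =>
              obtain ⟨n1, s1⟩ := v
              rw [h3] at h'
              have h'' : dfsF grid (min n1 m) c2 s1 = some (n', s') := h'
              have hn1 := ih m (by omega) c1 (PySem.Set.add seen st) n1 s1 h3
              have := ih (min n1 m) (by omega) c2 s1 n' s' h''
              omega
    · have h2' : pvWithin grid st.1.1 st.1.2 = false := by simpa using h2
      rw [dfsF_stop_out grid n st seen h2'] at h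
      simp only [Option.some.injEq, Prod.mk.injEq] at h
      omega

-- unfolding lemmas for loopF
theorem loopF_nil (grid : List String) (n : Nat) (seen : List ((Int × Int) × (Int × Int))) :
    loopF grid n [] seen = some seen := by
  rw [loopF.eq_def]

theorem loopF_skip (grid : List String) (n : Nat) (st : (Int × Int) × (Int × Int))
    (rest seen : List ((Int × Int) × (Int × Int)))
    (h : st ∈ seen ∨ pvWithin grid st.1.1 st.1.2 = false) :
    loopF grid n (st :: rest) seen = loopF grid n rest seen := by
  rw [loopF.eq_def]
  rcases h with h | h
  · simp [h]
  · simp [h]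

theorem loopF_zero (grid : List String) (st : (Int × Int) × (Int × Int))
    (rest seen : List ((Int × Int) × (Int × Int))) (h1 : st ∉ seen)
    (h2 : pvWithin grid st.1.1 st.1.2 = true) :
    loopF grid 0 (st :: rest) seen = none := by
  rw [loopF.eq_def]; simp [h1, h2]

theorem loopF_go (grid : List String) (m : Nat) (st : (Int × Int) × (Int × Int))
    (rest seen : List ((Int × Int) × (Int × Int))) (h1 : st ∉ seen)
    (h2 : pvWithin grid st.1.1 st.1.2 = true) :
    loopF grid (m + 1) (st :: rest) seen =
      match pvSuccessors grid st.1 st.2 with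
      | none => none
      | some succs => loopF grid m (succs ++ rest) (PySem.Set.add seen st) := by
  rw [loopF.eq_def]; simp [h1, h2]

-- the stack machine simulates the recursion: running the loop on st :: rest is running the
-- recursion on st and then the loop on rest with the updated seen and fuel (none propagates)
theorem loop_sim (grid : List String) :
    ∀ n st seen rest,
      loopF grid n (st :: rest) seen =
        match dfsF grid n st seen with
        | none => none
        | some (n', s') => loopF grid n' rest s' := by
  intro n
  induction n using Nat.strong_induction_on with
  | _ n ih =>
    intro st seen rest
    by_cases h1 : st ∈ seen
    · rw [loopF_skip grid n st rest seen (Or.inl h1), dfsF_stop_seen grid n st seen h1]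
    by_cases h2 : pvWithin grid st.1.1 st.1.2
    · match n with
      | 0 => rw [loopF_zero grid st rest seen h1 h2, dfsF_zero grid st seen h1 h2]
      | Nat.succ m =>
        rw [loopF_go grid m st rest seen h1 h2, dfsF_succ_eq grid m st seen h1 h2]
        cases hsucc : pvSuccessors grid st.1 st.2 with
        | none => rfl
        | some l =>
          match l with
          | [] =>
            show loopF grid m ([] ++ rest) (PySem.Set.add seen st) =
              loopF grid m rest (PySem.Set.add seen st)
            rw [List.nil_append]
          | [c] =>
            show loopF grid m (c :: rest) (PySem.Set.add seen st) =
              (match dfsF grid m c (PySem.Set.add seen st) with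
               | none => none
               | some (n', s') => loopF grid n' rest s')
            exact ih m (by omega) c (PySem.Set.add seen st) rest
          | c1 :: c2 :: tl =>
            have hlen := pvSuccessors_len grid st.1 st.2 _ hsucc
            cases tl with
            | cons x xs => simp at hlen
            | nil =>
              show loopF grid m (c1 :: c2 :: rest) (PySem.Set.add seen st) =
                (match (match dfsF grid m c1 (PySem.Set.add seen st) with
                        | none => none
                        | some (n1, s1) => dfsF grid (min n1 m) c2 s1) with
                 | none => none
                 | some (n', s') => loopF grid n' rest s')
              rw [ih m (by omega) c1 (PySem.Set.add seen st) (c2 :: rest)]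
              cases h3 : dfsF grid m c1 (PySem.Set.add seen st) with
              | none => rfl
              | some v =>
                obtain ⟨n1, s1⟩ := v
                have hn1 : n1 ≤ m := dfsF_fuel_le grid m c1 (PySem.Set.add seen st) n1 s1 h3
                show loopF grid n1 (c2 :: rest) s1 =
                  (match dfsF grid (min n1 m) c2 s1 with
                   | none => none
                   | some (n', s') => loopF grid n' rest s')
                rw [Nat.min_eq_left hn1]
                exact ih n1 (by omega) c2 s1 rest
    · have h2' : pvWithin grid st.1.1 st.1.2 = false := by simpa using h2
      rw [loopF_skip grid n st rest seen (Or.inr h2'), dfsF_stop_out grid n st seen h2']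

-- ===== VERDICT (by name: the statement is the Claim_ definition above) =====
theorem dfs_spec : Claim_equal_dfs := by
  unfold Claim_equal_dfs
  intro grid pos direc seen _ _
  unfold Spec_dfs dfs dfs_alt
  rw [loop_sim grid (pvFuel grid) (pos, direc) seen []]
  cases h : dfsF grid (pvFuel grid) (pos, direc) seen with
  | none => rfl
  | some v =>
    obtain ⟨n', s'⟩ := v
    show s' = (match loopF grid n' [] s' with | some s => s | none => seen)
    rw [loopF_nil grid n' s']
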